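-- pv_equiv track=rewrite | github.com/cosmicgenius/fe | tokenize_base.py | bpe_replace
-- ===== SOURCE A (Python) =====
-- import itertools
--
-- def bpe_replace(L, a, b, c):
--     replace_idx = [i for i in range(len(L) - 1) if L[i] == a and L[i+1] == b]
--     if len(replace_idx) == 0: return L
--
--     # delete overlaps, slow, but probabily ok
--     mask = [True] * len(replace_idx)
--     for i in range(1, len(replace_idx)):
--         if replace_idx[i] - replace_idx[i-1] == 1 and mask[i-1]:
--             mask[i] = False
--     replace_idx = list(itertools.compress(replace_idx, mask))
--
--     return L[:replace_idx[0]] + [c] + list(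
--            itertools.chain.from_iterable(L[i+2:j] + [c] for i, j in zip(replace_idx[:-1], replace_idx[1:]))) + \
--            L[replace_idx[-1]+2:]
-- ===== SOURCE B (Python) =====
-- def bpe_replace(L, a, b, c):
--     out = []
--     i = 0
--     n = len(L)
--     while i < n:
--         if i + 1 < n and L[i] == a and L[i + 1] == b:
--             out.append(c)
--             i += 2
--         else:
--             out.append(L[i])
--             i += 1
--     return out
-- ===== Notes on version B (the rewrite author's own statement) =====
-- stated objective: simpler
-- what changed: Replaces the match-index collection, overlap-mask pass and slice/chain reconstruction with a single greedy forward scan that emits c and skips 2 on a match, else copies one element.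
import Mathlib
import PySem

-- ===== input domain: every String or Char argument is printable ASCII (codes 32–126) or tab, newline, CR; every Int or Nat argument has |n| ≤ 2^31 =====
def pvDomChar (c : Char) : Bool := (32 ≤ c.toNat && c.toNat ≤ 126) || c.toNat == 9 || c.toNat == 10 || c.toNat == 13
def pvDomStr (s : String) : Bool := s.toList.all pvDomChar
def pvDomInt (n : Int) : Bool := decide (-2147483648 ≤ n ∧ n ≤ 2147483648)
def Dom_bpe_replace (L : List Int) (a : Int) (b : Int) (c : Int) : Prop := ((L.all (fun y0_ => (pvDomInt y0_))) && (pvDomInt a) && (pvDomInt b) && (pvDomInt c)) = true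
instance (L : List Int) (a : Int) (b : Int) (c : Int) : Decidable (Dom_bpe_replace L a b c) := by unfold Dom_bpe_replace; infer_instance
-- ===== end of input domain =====

-- B replaces A's index-collection + overlap-mask + slice/chain reconstruction by one greedy
-- forward scan (same O(n) cost; objective: simpler).

-- ===== PORT A =====
-- replace_idx = [i for i in range(len(L) - 1) if L[i] == a and L[i+1] == b]
-- (indices produced by range are in bounds, so L[i] is List.getD; exact here)
def pvIdx (L : List Int) (a b : Int) : List Nat :=
  (List.range (L.length - 1)).filter (fun i => decide (L.getD i 0 = a) && decide (L.getD (i+1) 0 = b))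

-- body of the mask loop: mask[i] = False if replace_idx[i] - replace_idx[i-1] == 1 and mask[i-1]
-- (replace_idx is strictly increasing, so Nat subtraction is exact for the Python int subtraction)
def pvStep (idx : List Nat) (m : List Bool) (i : Nat) : List Bool :=
  if decide (idx.getD i 0 - idx.getD (i-1) 0 = 1) && m.getD (i-1) false then m.set i false else m

-- mask = [True]*len(idx); for i in range(1, len(idx)): …
def pvMask (idx : List Nat) : List Bool :=
  (List.range' 1 (idx.length - 1)).foldl (pvStep idx) (List.replicate idx.length true)

-- itertools.compress(idx, mask)
def pvCompress (idx : List Nat) (mask : List Bool) : List Nat :=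
  (idx.zip mask).filterMap (fun p => if p.2 then some p.1 else none)

-- slices L[:r0], L[i+2:j], L[rlast+2:] with 0 ≤ i+2 ≤ j are exactly take/drop;
-- r is nonempty here (mask[0] stays True), so r[0] = r.getD 0 0 and r[-1] = r.getD (r.length-1) 0
def bpe_replace (L : List Int) (a : Int) (b : Int) (c : Int) : List Int :=
  let replace_idx := pvIdx L a b
  if replace_idx.length = 0 then L
  else
    let r := pvCompress replace_idx (pvMask replace_idx)
    L.take (r.getD 0 0) ++ [c] ++
      ((r.dropLast.zip r.tail).map (fun p => (L.drop (p.1 + 2)).take (p.2 - (p.1 + 2)) ++ [c])).flatten ++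
      L.drop (r.getD (r.length - 1) 0 + 2)

-- ===== PORT B =====
-- while i < n: append c and skip 2 on a match, else append L[i] and advance 1
def pvAltGo (L : List Int) (a b c : Int) (n i : Nat) : List Int :=
  if i < n then
    if i + 1 < n ∧ L.getD i 0 = a ∧ L.getD (i+1) 0 = b then
      c :: pvAltGo L a b c n (i + 2)
    else
      L.getD i 0 :: pvAltGo L a b c n (i + 1)
  else []
termination_by n - i
decreasing_by all_goals omega

def bpe_replace_alt (L : List Int) (a : Int) (b : Int) (c : Int) : List Int :=
  pvAltGo L a b c L.length 0

-- ===== PRECONDITION & SPEC =====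
def Spec_bpe_replace (L : List Int) (a : Int) (b : Int) (c : Int) (out : List Int) : Prop := out = bpe_replace_alt L a b c
instance (L : List Int) (a : Int) (b : Int) (c : Int) (out : List Int) : Decidable (Spec_bpe_replace L a b c out) := by unfold Spec_bpe_replace; infer_instance

-- ===== CLAIM (what is proved, stated in full; the proofs are below) =====
def Claim_equal_bpe_replace : Prop := ∀ (L : List Int) (a : Int) (b : Int) (c : Int), Dom_bpe_replace L a b c → Spec_bpe_replace L a b c (bpe_replace L a b c)

-- ===== LEMMAS AND PROOFS =====

-- structural greedy rewrite (spec-level reference implementation)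
def pvG (a b c : Int) : List Int → List Int
  | [] => []
  | [x] => [x]
  | x :: y :: R => if x = a ∧ y = b then c :: pvG a b c R else x :: pvG a b c (y :: R)

-- match positions of (a,b) in L
def pvMatches (a b : Int) : List Int → List Nat
  | x :: y :: R =>
      if x = a ∧ y = b then 0 :: (pvMatches a b (y :: R)).map (· + 1)
      else (pvMatches a b (y :: R)).map (· + 1)
  | _ => []

-- functional form of the mask values (after position 0)
def pvMSpec : Nat → Bool → List Nat → List Bool
  | _, _, [] => []
  | prev, pm, x :: xs =>
      let m := !(decide (x - prev = 1) && pm)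
      m :: pvMSpec x m xs

-- greedy overlap filter (state = previous index, previous mask bit)
def pvGm : Nat → Bool → List Nat → List Nat
  | _, _, [] => []
  | prev, pm, x :: xs =>
      if decide (x - prev = 1) && pm then pvGm x false xs else x :: pvGm x true xs

def pvGmList : List Nat → List Nat
  | [] => []
  | h :: t => h :: pvGm h true t

-- reconstruction from kept indices
def pvRebuild (L : List Int) (c : Int) : Nat → List Nat → List Int
  | p, [] => L.drop p
  | p, k :: ks => (L.drop p).take (k - p) ++ c :: pvRebuild L c (k + 2) ks

theorem pvIdx_eq (a b : Int) : ∀ L, pvIdx L a b = pvMatches a b L := by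
  intro L
  induction L with
  | nil => rfl
  | cons x T ih =>
    cases T with
    | nil => rfl
    | cons y R =>
      simp only [pvIdx, pvMatches, List.length_cons, Nat.add_sub_cancel] at ih ⊢
      rw [List.range_succ_eq_map, List.filter_cons, List.filter_map]
      simp only [List.getD_cons_succ, List.getD_cons_zero, Function.comp_def, Nat.succ_eq_add_one] at ih ⊢
      rw [ih]
      by_cases h : x = a ∧ y = b <;> simp [h]

theorem pvMSpec_length (xs : List Nat) : ∀ prev pm, (pvMSpec prev pm xs).length = xs.length := by
  induction xs with
  | nil => intro _ _; rfl
  | cons x xs ih => intro prev pm; simp [pvMSpec, ih]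

-- recurrence for the mask value at position j+1, read through getD
theorem pvMSpec_getD (xs : List Nat) : ∀ prev pm j, j < xs.length →
    (pvMSpec prev pm xs).getD j false =
      !(decide ((prev :: xs).getD (j+1) 0 - (prev :: xs).getD j 0 = 1) &&
        (pm :: pvMSpec prev pm xs).getD j false) := by
  induction xs with
  | nil => intro _ _ j h; simp at h
  | cons x xs ih =>
    intro prev pm j h
    cases j with
    | zero => simp [pvMSpec]
    | succ j =>
      simp only [pvMSpec, List.getD_cons_succ]
      exact ih x _ j (by simpa using h)

theorem getD_take_of_lt {M : List Bool} {j n : Nat} (d : Bool) (h : j < n) (h2 : j < M.length) :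
    (M.take n).getD j d = M.getD j d := by
  rw [List.getD_eq_getElem _ _ (by simp; omega), List.getD_eq_getElem _ _ h2, List.getElem_take]

theorem pvMask_inv (h : Nat) (t : List Nat) : ∀ j, j ≤ t.length →
    (List.range' 1 j).foldl (pvStep (h :: t)) (List.replicate (t.length + 1) true) =
      (true :: pvMSpec h true t).take (j + 1) ++ List.replicate (t.length - j) true := by
  intro j
  induction j with
  | zero => intro _; simp [List.replicate_succ]
  | succ j ih =>
    intro hj
    have hjt : j < t.length := by omega
    have hMlen : (true :: pvMSpec h true t).length = t.length + 1 := by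
      simp [pvMSpec_length]
    rw [List.range'_1_concat, List.foldl_append, ih (by omega)]
    set M := true :: pvMSpec h true t with hM
    have htake : (M.take (j + 1)).length = j + 1 := by
      simp [hMlen]; omega
    have hgetDj : (M.take (j + 1) ++ List.replicate (t.length - j) true).getD j false = M.getD j false := by
      rw [List.getD_append _ _ _ _ (by omega), getD_take_of_lt _ (by omega) (by omega)]
    have hrec := pvMSpec_getD t h true j hjt
    -- value of the mask at position j+1
    have hMj1 : M.getD (j + 1) false =
        !(decide ((h :: t).getD (j + 1) 0 - (h :: t).getD j 0 = 1) && M.getD j false) := by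
      simpa using hrec
    simp only [List.foldl_cons, List.foldl_nil]
    rw [pvStep]
    have hidx : ((h :: t).getD (1 + j) 0) = (h :: t).getD (j + 1) 0 := by rw [Nat.add_comm]
    have hsub : 1 + j - 1 = j := by omega
    rw [hidx, hsub, hgetDj]
    have hM2 : j + 1 < M.length := by omega
    have htake2 : M.take (j + 2) = M.take (j + 1) ++ [M[j + 1]] := by
      exact List.take_succ_eq_append_getElem hM2
    have hrepl : List.replicate (t.length - j) true = true :: List.replicate (t.length - (j + 1)) true := by
      rw [← List.replicate_succ]; congr 1; omega
    by_cases hcond : (decide ((h :: t).getD (j + 1) 0 - (h :: t).getD j 0 = 1) && M.getD j false) = true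
    · rw [if_pos hcond]
      rw [hrepl, Nat.add_comm 1 j]
      have hset : (M.take (j + 1) ++ true :: List.replicate (t.length - (j + 1)) true).set (j + 1) false =
          M.take (j + 1) ++ false :: List.replicate (t.length - (j + 1)) true := by
        rw [List.set_append_right _ _ (by rw [htake])]
        rw [htake]
        simp
      rw [hset, show j + 1 + 1 = j + 2 by omega, htake2]
      have : M[j + 1] = false := by
        rw [← List.getD_eq_getElem _ false hM2, hMj1, hcond]; rfl
      simp [this]
    · rw [if_neg hcond]
      rw [show j + 1 + 1 = j + 2 by omega, htake2]
      have : M[j + 1] = true := by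
        rw [← List.getD_eq_getElem _ false hM2, hMj1, Bool.eq_false_iff.mpr hcond]; rfl
      rw [this, hrepl]
      simp

theorem pvMask_eq (h : Nat) (t : List Nat) : pvMask (h :: t) = true :: pvMSpec h true t := by
  have := pvMask_inv h t t.length (le_refl _)
  simp only [pvMask, List.length_cons, Nat.add_sub_cancel]
  rw [this, Nat.sub_self, List.replicate_zero, List.append_nil,
    List.take_of_length_le (by simp [pvMSpec_length])]

theorem pvZip_filterMap (xs : List Nat) : ∀ prev pm,
    ((xs.zip (pvMSpec prev pm xs)).filterMap (fun p => if p.2 then some p.1 else none)) =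
      pvGm prev pm xs := by
  induction xs with
  | nil => intro _ _; rfl
  | cons x xs ih =>
    intro prev pm
    simp only [pvMSpec, pvGm, List.zip_cons_cons, List.filterMap_cons]
    by_cases hc : (decide (x - prev = 1) && pm) = true
    · simp [hc, ih x false]
    · rw [Bool.eq_false_iff.mpr hc]
      simp [ih x true]

theorem pvCompress_eq (idx : List Nat) : pvCompress idx (pvMask idx) = pvGmList idx := by
  cases idx with
  | nil => rfl
  | cons h t =>
    rw [pvMask_eq, pvCompress, List.zip_cons_cons, List.filterMap_cons]
    simp [pvGmList, pvZip_filterMap]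

theorem pvChain (L : List Int) (c : Int) : ∀ (t : List Nat) (h : Nat),
    ((((h :: t).dropLast.zip (h :: t).tail).map
        (fun p => (L.drop (p.1 + 2)).take (p.2 - (p.1 + 2)) ++ [c])).flatten)
      ++ L.drop ((h :: t).getD ((h :: t).length - 1) 0 + 2) = pvRebuild L c (h + 2) t := by
  intro t
  induction t with
  | nil => intro h; simp [pvRebuild]
  | cons x t' ih =>
    intro h
    have htail := ih x
    simp only [List.dropLast_cons₂, List.tail_cons, List.zip_cons_cons, List.map_cons,
      List.flatten_cons, List.length_cons, Nat.add_sub_cancel, List.getD_cons_succ] at htail ⊢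
    rw [pvRebuild]
    rw [← htail]
    simp

theorem pvA_eq (L : List Int) (a b c : Int) :
    bpe_replace L a b c = pvRebuild L c 0 (pvGmList (pvMatches a b L)) := by
  unfold bpe_replace
  rw [pvIdx_eq]
  cases hm : pvMatches a b L with
  | nil => simp [pvGmList, pvRebuild]
  | cons h t =>
    rw [if_neg (by simp)]
    rw [pvCompress_eq]
    simp only [pvGmList]
    rw [show pvRebuild L c 0 (h :: pvGm h true t) =
      (L.drop 0).take (h - 0) ++ c :: pvRebuild L c (h + 2) (pvGm h true t) from rfl]
    rw [List.append_assoc, List.append_assoc, pvChain L c (pvGm h true t) h]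
    simp

theorem pvGm_false (xs : List Nat) (prev : Nat) : pvGm prev false xs = pvGmList xs := by
  cases xs <;> simp [pvGm, pvGmList]

theorem pvGm_shift (xs : List Nat) : ∀ prev pm (d : Nat),
    pvGm (prev + d) pm (xs.map (· + d)) = (pvGm prev pm xs).map (· + d) := by
  induction xs with
  | nil => intro _ _ _; rfl
  | cons x xs ih =>
    intro prev pm d
    simp only [List.map_cons, pvGm, Nat.add_sub_add_right]
    by_cases hc : (decide (x - prev = 1) && pm) = true
    · rw [if_pos hc, if_pos hc, ih]
    · rw [if_neg hc, if_neg hc, List.map_cons, ih]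

theorem pvGmList_shift (xs : List Nat) (d : Nat) :
    pvGmList (xs.map (· + d)) = (pvGmList xs).map (· + d) := by
  cases xs with
  | nil => rfl
  | cons h t => simp only [List.map_cons, pvGmList]; rw [← pvGm_shift]

theorem pvRebuild_shift (L : List Int) (c : Int) : ∀ (ks : List Nat) (p d : Nat),
    pvRebuild L c (p + d) (ks.map (· + d)) = pvRebuild (L.drop d) c p ks := by
  intro ks
  induction ks with
  | nil => intro p d; simp [pvRebuild, List.drop_drop, Nat.add_comm]
  | cons k ks ih =>
    intro p d
    simp only [List.map_cons, pvRebuild, Nat.add_sub_add_right, List.drop_drop]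
    rw [show k + d + 2 = (k + 2) + d by omega, ih, Nat.add_comm d p]

theorem pvRebuild_cons (T : List Int) (x c : Int) (ks : List Nat) :
    pvRebuild (x :: T) c 0 (ks.map (· + 1)) = x :: pvRebuild T c 0 ks := by
  cases ks with
  | nil => rfl
  | cons k ks' =>
    simp only [List.map_cons, pvRebuild, List.drop_zero, Nat.sub_zero, List.take_succ_cons]
    rw [show k + 1 + 2 = (k + 2) + 1 by omega, pvRebuild_shift, List.drop_one, List.tail_cons]
    simp

theorem pvMap_map_2 (l : List Nat) : (l.map (· + 1)).map (· + 1) = l.map (· + 2) := by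
  rw [List.map_map]; congr 1

theorem pvG_eq (a b c : Int) : ∀ (n : Nat) (L : List Int), L.length ≤ n →
    pvG a b c L = pvRebuild L c 0 (pvGmList (pvMatches a b L)) := by
  intro n
  induction n with
  | zero =>
    intro L hL
    have : L = [] := List.eq_nil_of_length_eq_zero (by omega)
    subst this; rfl
  | succ n ih =>
    intro L hL
    match L with
    | [] => rfl
    | [x] => simp [pvG, pvMatches, pvGmList, pvRebuild]
    | x :: y :: R =>
      by_cases h : x = a ∧ y = b
      · -- match at position 0: kept indices are 0 followed by the shifted kept of R
        have hK : pvGm 0 true ((pvMatches a b (y :: R)).map (· + 1)) =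
            (pvGmList (pvMatches a b R)).map (· + 2) := by
          match R with
          | [] => rfl
          | z :: R' =>
            by_cases h2 : y = a ∧ z = b
            · rw [show pvMatches a b (y :: z :: R') =
                0 :: (pvMatches a b (z :: R')).map (· + 1) from by rw [pvMatches, if_pos h2]]
              simp only [List.map_cons, pvMap_map_2]
              rw [show pvGm 0 true ((0 + 1) :: (pvMatches a b (z :: R')).map (· + 2)) =
                pvGm 1 false ((pvMatches a b (z :: R')).map (· + 2)) from by simp [pvGm]]
              rw [pvGm_false, pvGmList_shift]
            · rw [show pvMatches a b (y :: z :: R') =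
                (pvMatches a b (z :: R')).map (· + 1) from by rw [pvMatches, if_neg h2]]
              rw [pvMap_map_2, ← pvGmList_shift]
              match hmz : (pvMatches a b (z :: R')).map (· + 2) with
              | [] => rfl
              | k :: rest =>
                have hk : k ≠ 1 := by
                  have : k ∈ (pvMatches a b (z :: R')).map (· + 2) := by rw [hmz]; simp
                  simp only [List.mem_map] at this
                  obtain ⟨w, _, hw⟩ := this; omega
                rw [pvGm, pvGmList, if_neg (by simp; omega)]
        rw [show pvG a b c (x :: y :: R) = c :: pvG a b c R from by rw [pvG, if_pos h]]
        rw [show pvMatches a b (x :: y :: R) =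
          0 :: (pvMatches a b (y :: R)).map (· + 1) from by rw [pvMatches, if_pos h]]
        rw [pvGmList, hK]
        rw [show pvRebuild (x :: y :: R) c 0 (0 :: (pvGmList (pvMatches a b R)).map (· + 2)) =
          c :: pvRebuild (x :: y :: R) c 2 ((pvGmList (pvMatches a b R)).map (· + 2)) from by
            rw [pvRebuild]; simp]
        rw [show (2 : Nat) = 0 + 2 from rfl, pvRebuild_shift]
        rw [ih R (by simp at hL ⊢; omega)]
        rfl
      · rw [show pvG a b c (x :: y :: R) = x :: pvG a b c (y :: R) from by rw [pvG, if_neg h]]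
        rw [show pvMatches a b (x :: y :: R) =
          (pvMatches a b (y :: R)).map (· + 1) from by rw [pvMatches, if_neg h]]
        rw [pvGmList_shift, pvRebuild_cons]
        rw [ih (y :: R) (by simp at hL ⊢; omega)]

theorem pvAltGo_eq (L : List Int) (a b c : Int) : ∀ (k i : Nat), L.length - i ≤ k →
    pvAltGo L a b c L.length i = pvG a b c (L.drop i) := by
  intro k
  induction k with
  | zero =>
    intro i hi
    rw [pvAltGo, if_neg (by omega), List.drop_eq_nil_of_le (by omega)]
    rfl
  | succ k ih =>
    intro i hi
    by_cases hin : i < L.length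
    · rw [pvAltGo, if_pos hin]
      have hdropi : L.drop i = L[i] :: L.drop (i + 1) := List.drop_eq_getElem_cons hin
      have hgdi : L.getD i 0 = L[i] := List.getD_eq_getElem L 0 hin
      by_cases hc : i + 1 < L.length ∧ L.getD i 0 = a ∧ L.getD (i + 1) 0 = b
      · obtain ⟨h1, h2, h3⟩ := hc
        have hdropi1 : L.drop (i + 1) = L[i + 1] :: L.drop (i + 2) := List.drop_eq_getElem_cons h1
        have hgdi1 : L.getD (i + 1) 0 = L[i + 1] := List.getD_eq_getElem L 0 h1
        rw [if_pos ⟨h1, h2, h3⟩, hdropi, hdropi1, pvG,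
          if_pos ⟨by rw [← hgdi]; exact h2, by rw [← hgdi1]; exact h3⟩,
          ih (i + 2) (by omega)]
      · rw [if_neg hc, ih (i + 1) (by omega), hdropi, hgdi]
        cases hd1 : L.drop (i + 1) with
        | nil => rfl
        | cons w ws =>
          have h1 : i + 1 < L.length := by
            by_contra hle
            rw [List.drop_eq_nil_of_le (by omega)] at hd1; simp at hd1
          have hw : w = L[i + 1] := by
            rw [List.drop_eq_getElem_cons h1] at hd1; exact (List.cons.injEq _ _ _ _ ▸ hd1).1.symm
          rw [pvG, if_neg (by
            rintro ⟨ha, hb⟩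
            exact hc ⟨h1, by rw [List.getD_eq_getElem L 0 hin]; exact ha,
              by rw [List.getD_eq_getElem L 0 h1, ← hw]; exact hb⟩)]
    · rw [pvAltGo, if_neg hin, List.drop_eq_nil_of_le (by omega)]
      rfl

theorem pv_final (L : List Int) (a b c : Int) : bpe_replace L a b c = bpe_replace_alt L a b c := by
  rw [pvA_eq, bpe_replace_alt, pvAltGo_eq L a b c L.length 0 (by omega), List.drop_zero,
    ← pvG_eq a b c L.length L (le_refl _)]

-- ===== VERDICT (by name: the statement is the Claim_ definition above) =====
theorem bpe_replace_spec : Claim_equal_bpe_replace := by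
  intro L a b c _
  unfold Spec_bpe_replace
  exact pv_final L a b c
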